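-- pv_equiv track=rewrite | github.com/MrBrantCode/unitest_baseline | mut_generate/mist_train_taco/taco_6667/solution.py | calculate_sum_of_products
-- ===== SOURCE A (Python) =====
-- def calculate_sum_of_products(N, A):
--     MOD = 1000000007
--     total = 0
--     res = 0
--     for i in range(N):
--         res += total * A[i]
--         res %= MOD
--         total += A[i]
--     return res
-- ===== SOURCE B (Python) =====
-- def calculate_sum_of_products(N, A):
--     MOD = 1000000007
--     S = sum(A[i] for i in range(N))
--     Q = sum(A[i] * A[i] for i in range(N))
--     return ((S * S - Q) // 2) % MOD
-- ===== Notes on version B (the rewrite author's own statement) =====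
-- stated objective: simpler
-- what changed: Replaces the per-element prefix-sum/mod accumulation loop with the closed-form pairwise-product identity ((S^2 - Q)//2) mod p computed from the plain sum and sum of squares of A[0:N].
import Mathlib
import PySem

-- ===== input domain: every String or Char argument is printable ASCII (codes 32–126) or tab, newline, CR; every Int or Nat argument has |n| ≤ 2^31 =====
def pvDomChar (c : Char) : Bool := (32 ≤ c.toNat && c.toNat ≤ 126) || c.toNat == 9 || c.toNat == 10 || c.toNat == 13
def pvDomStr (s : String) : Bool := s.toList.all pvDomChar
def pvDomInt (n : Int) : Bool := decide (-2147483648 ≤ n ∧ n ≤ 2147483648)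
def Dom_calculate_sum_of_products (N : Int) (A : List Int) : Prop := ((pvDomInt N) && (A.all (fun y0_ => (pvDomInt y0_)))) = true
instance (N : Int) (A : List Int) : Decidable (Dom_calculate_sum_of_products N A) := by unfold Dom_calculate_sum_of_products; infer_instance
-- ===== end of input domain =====

-- B computes the same sum of pairwise products mod 1000000007 by the closed form
-- ((S^2 - Q)//2) mod p from the sum S and sum of squares Q of A[0:N], instead of
-- A's per-element prefix-sum accumulation with a mod at every step (objective: simpler).

-- ===== PORT A =====
-- A[i] ported as pyGetD A i 0; faithful under Pre_ (0 ≤ i < N ≤ len A).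
def calculate_sum_of_products (N : Int) (A : List Int) : Int :=
  ((PySem.List.pyRange 0 N 1).foldl
    (fun st i =>
      let a := PySem.List.pyGetD A i 0
      let res := PySem.Int.mod (st.2 + st.1 * a) 1000000007
      (st.1 + a, res))
    ((0 : Int), (0 : Int))).2

-- ===== PORT B =====
def calculate_sum_of_products_alt (N : Int) (A : List Int) : Int :=
  let S := (PySem.List.pyRange 0 N 1).foldl (fun s i => s + PySem.List.pyGetD A i 0) 0
  let Q := (PySem.List.pyRange 0 N 1).foldl
    (fun s i => s + PySem.List.pyGetD A i 0 * PySem.List.pyGetD A i 0) 0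
  PySem.Int.mod (PySem.Int.floordiv (S * S - Q) 2) 1000000007

-- ===== PRECONDITION & SPEC =====
-- A raises IndexError when N > len(A) (it reads A[i] for every i in range(N)); those inputs are excluded.
def Pre_calculate_sum_of_products (N : Int) (A : List Int) : Prop := N ≤ (A.length : Int)
instance (N : Int) (A : List Int) : Decidable (Pre_calculate_sum_of_products N A) := by
  unfold Pre_calculate_sum_of_products; infer_instance

def pvWitness_calculate_sum_of_products : Int × List Int := (3, [2, -5, 7])

def Spec_calculate_sum_of_products (N : Int) (A : List Int) (out : Int) : Prop := out = calculate_sum_of_products_alt N A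
instance (N : Int) (A : List Int) (out : Int) : Decidable (Spec_calculate_sum_of_products N A out) := by unfold Spec_calculate_sum_of_products; infer_instance

-- ===== CLAIM (what is proved, stated in full; the proofs are below) =====
def Claim_equal_calculate_sum_of_products : Prop := ∀ (N : Int) (A : List Int), Dom_calculate_sum_of_products N A → Pre_calculate_sum_of_products N A → Spec_calculate_sum_of_products N A (calculate_sum_of_products N A)

-- ===== LEMMAS AND PROOFS =====

-- Loop invariant over a Nat-length prefix of indices: A's fold state is
-- (S, P mod M) where 2*P = S*S - Q, with S/Q the fold values of B.
lemma csp_key (A : List Int) (n : Nat) :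
    ∃ P : Int,
      ((PySem.List.pyRange 0 (n : Int) 1).foldl
        (fun st i =>
          let a := PySem.List.pyGetD A i 0
          let res := PySem.Int.mod (st.2 + st.1 * a) 1000000007
          (st.1 + a, res))
        ((0 : Int), (0 : Int)))
      = (((PySem.List.pyRange 0 (n : Int) 1).foldl (fun s i => s + PySem.List.pyGetD A i 0) 0),
         PySem.Int.mod P 1000000007)
      ∧ 2 * P =
        ((PySem.List.pyRange 0 (n : Int) 1).foldl (fun s i => s + PySem.List.pyGetD A i 0) 0) *
        ((PySem.List.pyRange 0 (n : Int) 1).foldl (fun s i => s + PySem.List.pyGetD A i 0) 0) -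
        ((PySem.List.pyRange 0 (n : Int) 1).foldl
          (fun s i => s + PySem.List.pyGetD A i 0 * PySem.List.pyGetD A i 0) 0) := by
  induction n with
  | zero =>
    refine ⟨0, ?_, by norm_num⟩
    simp [PySem.List.pyRange_one_eq_nil]
  | succ n ih =>
    obtain ⟨P, hst, hP⟩ := ih
    have hsplit : PySem.List.pyRange 0 ((n : Int) + 1) 1
        = PySem.List.pyRange 0 (n : Int) 1 ++ [(n : Int)] :=
      PySem.List.pyRange_one_succ_right (by positivity)
    push_cast
    rw [hsplit]
    simp only [List.foldl_append, List.foldl_cons, List.foldl_nil, hst]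
    set a := PySem.List.pyGetD A (n : Int) 0 with ha
    set S := (PySem.List.pyRange 0 (n : Int) 1).foldl (fun s i => s + PySem.List.pyGetD A i 0) 0 with hS
    refine ⟨P + S * a, ?_, by linear_combination hP⟩
    have hM : (0:Int) < 1000000007 := by norm_num
    simp only [PySem.Int.mod_eq_emod_of_pos hM, Int.emod_add_emod]

lemma csp_eq (N : Int) (A : List Int) :
    calculate_sum_of_products N A = calculate_sum_of_products_alt N A := by
  rcases (by omega : N ≤ 0 ∨ 0 < N) with hN | hN
  · simp [calculate_sum_of_products, calculate_sum_of_products_alt,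
      PySem.List.pyRange_one_eq_nil hN]
  · obtain ⟨n, rfl⟩ : ∃ n : Nat, N = (n : Int) := ⟨N.toNat, (Int.toNat_of_nonneg hN.le).symm⟩
    obtain ⟨P, hst, hP⟩ := csp_key A n
    unfold calculate_sum_of_products calculate_sum_of_products_alt
    rw [hst]
    have h2 : (0:Int) < 2 := by norm_num
    have : PySem.Int.floordiv
        ((PySem.List.pyRange 0 (n : Int) 1).foldl (fun s i => s + PySem.List.pyGetD A i 0) 0 *
         (PySem.List.pyRange 0 (n : Int) 1).foldl (fun s i => s + PySem.List.pyGetD A i 0) 0 -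
         (PySem.List.pyRange 0 (n : Int) 1).foldl
           (fun s i => s + PySem.List.pyGetD A i 0 * PySem.List.pyGetD A i 0) 0) 2 = P := by
      rw [← hP, PySem.Int.floordiv_eq_ediv_of_pos h2]
      exact Int.mul_ediv_cancel_left P (by norm_num)
    simp only [this]

-- ===== VERDICT (by name: the statement is the Claim_ definition above) =====
theorem calculate_sum_of_products_spec : Claim_equal_calculate_sum_of_products := by
  intro N A _ _
  exact csp_eq N A
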